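-- pv_equiv track=rewrite | github.com/DozzzeN/SKG | segmentation/test_sorting_sorting_addnoise_corr_test_sorting.py | my_find_peaks
-- ===== SOURCE A (Python) =====
-- def my_find_peaks(data, height=None, distance=None):
--     peaks = []
--     peak_height = []
--     last_peak_index = 0
--
--     for i in range(1, len(data) - 1):
--         if data[i] >= data[i - 1] and data[i] >= data[i + 1]:
--             if (height is None or data[i] > height) and (distance is None or i - last_peak_index >= distance):
--                 peaks.append(i)
--                 peak_height.append(data[i])
--                 last_peak_index = i
--
--     return peaks
-- ===== SOURCE B (Python) =====
-- def _first_at_least(a, x):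
--     # standard bisect_left: first position p with a[p] >= x (a sorted ascending)
--     lo, hi = 0, len(a)
--     while lo < hi:
--         mid = (lo + hi) // 2
--         if a[mid] < x:
--             lo = mid + 1
--         else:
--             hi = mid
--     return lo
--
--
-- def my_find_peaks(data, height=None, distance=None):
--     # stage 1: table of the interior plateau candidates passing the height filter
--     cands = [i for i in range(1, len(data) - 1)
--              if data[i] >= data[i - 1] and data[i] >= data[i + 1]
--              and (height is None or data[i] > height)]
--     if distance is None:
--         return cands
--     # stage 2: jump through the sorted candidate table by binary search:
--     # the next accepted peak is the first candidate >= last + distance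
--     peaks = []
--     last = 0
--     rest = cands
--     while True:
--         p = _first_at_least(rest, last + distance)
--         if p == len(rest):
--             break
--         last = rest[p]
--         peaks.append(last)
--         rest = rest[p + 1:]
--     return peaks
-- ===== Notes on version B (the rewrite author's own statement) =====
-- stated objective: alternative
-- what changed: Replaces A's single guarded scan (which interleaves peak detection, the unused peak_height list and distance thinning) by a candidate table plus binary-search jumping: each next accepted peak is found as the first remaining candidate >= last + distance via a hand-written bisect_left, so rejected candidates are skipped without per-element distance checks.
import Mathlib
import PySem

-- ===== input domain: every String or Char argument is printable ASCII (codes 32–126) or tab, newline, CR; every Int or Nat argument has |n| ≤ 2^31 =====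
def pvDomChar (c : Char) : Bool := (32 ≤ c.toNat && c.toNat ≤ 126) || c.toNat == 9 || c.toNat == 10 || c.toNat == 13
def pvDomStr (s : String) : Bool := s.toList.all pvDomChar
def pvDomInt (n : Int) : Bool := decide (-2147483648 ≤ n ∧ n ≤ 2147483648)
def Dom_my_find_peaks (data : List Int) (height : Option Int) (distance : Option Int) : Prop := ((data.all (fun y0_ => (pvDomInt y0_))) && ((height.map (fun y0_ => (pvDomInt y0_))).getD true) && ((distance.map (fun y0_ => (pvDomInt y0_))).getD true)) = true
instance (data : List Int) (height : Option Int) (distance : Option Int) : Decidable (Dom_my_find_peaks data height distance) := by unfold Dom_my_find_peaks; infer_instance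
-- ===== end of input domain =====

-- B replaces A's single guarded scan by a candidate table plus binary-search jumping to
-- each next accepted peak, dropping the unused peak_height accumulator (objective: alternative).

-- ===== PORT A =====
-- Loop indices i run over 1..len-2, so every data[i-1], data[i], data[i+1] access is in
-- range and the pyGetD default 0 is unreachable (exact).
def my_find_peaks (data : List Int) (height : Option Int) (distance : Option Int) : List Int :=
  ((PySem.List.pyRange 1 ((data.length : Int) - 1) 1).foldl
    (fun (st : List Int × List Int × Int) i =>
      if (decide (PySem.List.pyGetD data i 0 ≥ PySem.List.pyGetD data (i - 1) 0) &&
          decide (PySem.List.pyGetD data i 0 ≥ PySem.List.pyGetD data (i + 1) 0)) = true then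
        if ((match height with | none => true | some h => decide (PySem.List.pyGetD data i 0 > h)) &&
            (match distance with | none => true | some dm => decide (i - st.2.2 ≥ dm))) = true then
          (st.1 ++ [i], st.2.1 ++ [PySem.List.pyGetD data i 0], i)
        else st
      else st)
    ([], [], 0)).1

-- ===== PORT B =====
-- B-side helper: the candidate test (interior plateau peak passing the height filter).
def pvIsCand (data : List Int) (height : Option Int) (i : Int) : Bool :=
  decide (PySem.List.pyGetD data i 0 ≥ PySem.List.pyGetD data (i - 1) 0) &&
  decide (PySem.List.pyGetD data i 0 ≥ PySem.List.pyGetD data (i + 1) 0) &&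
  (match height with | none => true | some h => decide (PySem.List.pyGetD data i 0 > h))

-- Source B's hand-written _first_at_least is the standard bisect_left loop, ported as the
-- prelude primitive PySem.List.bisectLeft (same lo/hi halving). The while loop becomes
-- the obvious recursion on the shrinking `rest` slice with the same (peaks, last) state.
def pvJump (dm : Int) (rest : List Int) (last : Int) (peaks : List Int) : List Int :=
  let p := PySem.List.bisectLeft rest (last + dm)
  if hp : p < rest.length then
    pvJump dm (rest.drop (p + 1)) rest[p] (peaks ++ [rest[p]])
  else peaks
termination_by rest.length
decreasing_by simpa using by omega

def my_find_peaks_alt (data : List Int) (height : Option Int) (distance : Option Int) : List Int :=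
  let cands := (PySem.List.pyRange 1 ((data.length : Int) - 1) 1).filter (pvIsCand data height)
  match distance with
  | none => cands
  | some dm => pvJump dm cands 0 []

-- ===== PRECONDITION & SPEC =====
def Spec_my_find_peaks (data : List Int) (height : Option Int) (distance : Option Int) (out : List Int) : Prop := out = my_find_peaks_alt data height distance
instance (data : List Int) (height : Option Int) (distance : Option Int) (out : List Int) : Decidable (Spec_my_find_peaks data height distance out) := by unfold Spec_my_find_peaks; infer_instance

-- ===== CLAIM (what is proved, stated in full; the proofs are below) =====
def Claim_equal_my_find_peaks : Prop := ∀ (data : List Int) (height : Option Int) (distance : Option Int), Dom_my_find_peaks data height distance → Spec_my_find_peaks data height distance (my_find_peaks data height distance)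

-- ===== LEMMAS AND PROOFS =====

-- Reference greedy thinning (proof-only): accept c when guard g c last fires, updating last.
def pvLinT (g : Int → Int → Bool) : List Int → Int → List Int
  | [], _ => []
  | c :: t, last => if g c last then c :: pvLinT g t c else pvLinT g t last

-- A's fold over any index list, from state (p, ph, last), produces in its peaks component
-- p ++ the reference thinning of the (b1 && b2)-filtered list with guard b3.
theorem pv_fold_A (b1 b2 : Int → Bool) (b3 : Int → Int → Bool) (gv : Int → Int) :
    ∀ (l : List Int) (p ph : List Int) (last : Int),
      (l.foldl
        (fun (st : List Int × List Int × Int) i =>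
          if b1 i = true then
            if (b2 i && b3 i st.2.2) = true then (st.1 ++ [i], st.2.1 ++ [gv i], i) else st
          else st) (p, ph, last)).1 =
      p ++ pvLinT b3 (l.filter (fun i => b1 i && b2 i)) last := by
  intro l
  induction l with
  | nil => intro p ph last; simp [pvLinT]
  | cons i t ih =>
    intro p ph last
    cases h1 : b1 i with
    | false =>
      simp only [List.foldl_cons, List.filter_cons, h1, Bool.false_and, Bool.false_eq_true,
        reduceIte]
      exact ih p ph last
    | true =>
      cases h2 : b2 i with
      | false =>
        simp only [List.foldl_cons, List.filter_cons, h1, h2, Bool.true_and, Bool.false_and,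
          Bool.false_eq_true, reduceIte]
        exact ih p ph last
      | true =>
        cases h3 : b3 i last with
        | false =>
          simp only [List.foldl_cons, List.filter_cons, h1, h2, h3, Bool.true_and,
            Bool.and_false, Bool.false_eq_true, reduceIte, pvLinT]
          exact ih p ph last
        | true =>
          simp only [List.foldl_cons, List.filter_cons, h1, h2, h3,
            Bool.and_true, reduceIte, pvLinT]
          rw [ih (p ++ [i]) (ph ++ [gv i]) i]
          simp
-- With an always-true guard the thinning keeps everything.
theorem pvLinT_true : ∀ (l : List Int) (last : Int), pvLinT (fun _ _ => true) l last = l := by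
  intro l
  induction l with
  | nil => intro last; simp [pvLinT]
  | cons c t ih => intro last; simp [pvLinT, ih]

-- Rejected elements are skipped with `last` unchanged.
theorem pvLinT_skip (g : Int → Int → Bool) :
    ∀ (l1 l2 : List Int) (last : Int), (∀ c ∈ l1, g c last = false) →
      pvLinT g (l1 ++ l2) last = pvLinT g l2 last := by
  intro l1
  induction l1 with
  | nil => intro l2 last _; simp
  | cons c t ih =>
    intro l2 last h
    have hc : g c last = false := h c (List.mem_cons_self)
    simp only [List.cons_append, pvLinT, hc, Bool.false_eq_true, reduceIte]
    exact ih l2 last (fun x hx => h x (List.mem_cons_of_mem _ hx))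

theorem pvLinT_nil (g : Int → Int → Bool) (l : List Int) (last : Int)
    (h : ∀ c ∈ l, g c last = false) : pvLinT g l last = [] := by
  have := pvLinT_skip g l [] last h
  simpa [pvLinT] using this

-- B's jump loop equals the reference thinning on a sorted candidate list.
theorem pvJump_eq (dm : Int) :
    ∀ (n : Nat) (rest : List Int), rest.length = n → rest.Pairwise (· ≤ ·) →
      ∀ (last : Int) (peaks : List Int),
        pvJump dm rest last peaks =
          peaks ++ pvLinT (fun c l => decide (c - l ≥ dm)) rest last := by
  intro n
  induction n using Nat.strong_induction_on with
  | _ n ih =>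
    intro rest hn hs last peaks
    obtain ⟨hle, hlt, hge⟩ := PySem.List.bisectLeft_spec rest (last + dm) hs
    rw [pvJump]
    by_cases hp : PySem.List.bisectLeft rest (last + dm) < rest.length
    · set p := PySem.List.bisectLeft rest (last + dm) with hpdef
      simp only [hp, dif_pos]
      have hdecomp : rest = rest.take p ++ (rest[p] :: rest.drop (p + 1)) := by
        conv_lhs => rw [← List.take_append_drop p rest]
        rw [List.getElem_cons_drop]
      have hlen : (rest.drop (p + 1)).length < n := by
        simp [List.length_drop]; omega
      have hsd : (rest.drop (p + 1)).Pairwise (· ≤ ·) :=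
        hs.sublist (List.drop_sublist _ _)
      rw [ih _ hlen _ rfl hsd]
      have hskip : ∀ c ∈ rest.take p, (fun c l => decide (c - l ≥ dm)) c last = false := by
        intro c hc
        obtain ⟨j, hj, hcj⟩ := List.getElem_of_mem hc
        have hjp : j < p := by
          have := hj; simp [List.length_take] at this; omega
        have hjlen : j < rest.length := lt_of_lt_of_le hjp hle
        have hv : rest[j] < last + dm := hlt j hjlen hjp
        have hcv : c = rest[j] := by
          rw [← hcj]; exact (List.getElem_take ..)
        simp only [decide_eq_false_iff_not]
        omega
      have hacc : decide (rest[p] - last ≥ dm) = true := by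
        have := hge p hp le_rfl
        simp only [decide_eq_true_eq]
        omega
      conv_rhs => rw [hdecomp]
      rw [pvLinT_skip _ _ _ _ hskip]
      simp only [pvLinT, hacc, reduceIte]
      simp
    · simp only [hp, dif_neg, not_false_eq_true]
      have : pvLinT (fun c l => decide (c - l ≥ dm)) rest last = [] := by
        apply pvLinT_nil
        intro c hc
        obtain ⟨j, hj, hcj⟩ := List.getElem_of_mem hc
        have hv : rest[j] < last + dm := hlt j hj (by omega)
        simp only [decide_eq_false_iff_not]
        omega
      simp [this]

-- The candidate table is sorted ascending.
theorem pv_cands_sorted (data : List Int) (height : Option Int) :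
    ((PySem.List.pyRange 1 ((data.length : Int) - 1) 1).filter
      (pvIsCand data height)).Pairwise (· ≤ ·) := by
  have h := PySem.List.pairwise_lt_pyRange_one 1 ((data.length : Int) - 1)
  exact (h.filter _).imp (fun h => le_of_lt h)

-- ===== VERDICT (by name: the statement is the Claim_ definition above) =====
theorem my_find_peaks_spec : Claim_equal_my_find_peaks := by
  intro data height distance hd
  clear hd
  unfold Spec_my_find_peaks my_find_peaks my_find_peaks_alt
  rw [pv_fold_A
    (fun i => decide (PySem.List.pyGetD data i 0 ≥ PySem.List.pyGetD data (i - 1) 0) &&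
              decide (PySem.List.pyGetD data i 0 ≥ PySem.List.pyGetD data (i + 1) 0))
    (fun i => match height with | none => true | some h => decide (PySem.List.pyGetD data i 0 > h))
    (fun c l => match distance with | none => true | some dm => decide (c - l ≥ dm))
    (fun i => PySem.List.pyGetD data i 0)
    (PySem.List.pyRange 1 ((data.length : Int) - 1) 1) [] [] 0]
  simp only [List.nil_append]
  cases distance with
  | none => exact pvLinT_true _ 0
  | some dm =>
    have h := pvJump_eq dm _
      ((PySem.List.pyRange 1 ((data.length : Int) - 1) 1).filter (pvIsCand data height))
      rfl (pv_cands_sorted data height) 0 []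
    simp only [List.nil_append] at h
    exact h.symm
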